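-- pv_equiv track=rewrite | github.com/niekvleeuwen/advent-of-code | 2024/dag_9/dag_9.py | compact_disk_map_with_fragmentation
-- ===== SOURCE A (Python) =====
-- def compact_disk_map_with_fragmentation(stretched_disk_map: list[str]) -> list[str]:
--     """Compact the disk map from 0..111....22222 to 022111222......"""
--     while "." in stretched_disk_map:
--         for i, digit in enumerate(stretched_disk_map):
--             if digit == ".":
--                 # Retrieve last item that is not free space
--                 last_item = None
--                 while last_item is None:
--                     last_index = len(stretched_disk_map) - 1
--                     last_item = stretched_disk_map[last_index]
--                     if last_item == ".":
--                         last_item = None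
--                     del stretched_disk_map[last_index]
--
--                 # Insert last item in the free space
--                 del stretched_disk_map[i]
--                 stretched_disk_map.insert(i, last_item)
--
--     return stretched_disk_map
-- ===== SOURCE B (Python) =====
-- def compact_disk_map_with_fragmentation(stretched_disk_map: list[str]) -> list[str]:
--     """Compact the disk map from 0..111....22222 to 022111222......"""
--     k = sum(1 for x in stretched_disk_map if x != ".")
--     supply = [x for x in reversed(stretched_disk_map) if x != "."]
--     out = []
--     s = 0
--     for x in stretched_disk_map[:k]:
--         if x == ".":
--             out.append(supply[s])
--             s += 1
--         else:
--             out.append(x)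
--     stretched_disk_map[:] = out
--     return stretched_disk_map
-- ===== Notes on version B (the rewrite author's own statement) =====
-- stated objective: alternative
-- what changed: Replaces A's restart-the-scan while loop with del/insert list surgery by a single counting pass plus one fill pass: count the non-dot blocks k, build the reversed block list once, then emit the first k positions replacing each dot by the next reversed block (return value; both A and B mutate the argument in place).
import Mathlib
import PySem

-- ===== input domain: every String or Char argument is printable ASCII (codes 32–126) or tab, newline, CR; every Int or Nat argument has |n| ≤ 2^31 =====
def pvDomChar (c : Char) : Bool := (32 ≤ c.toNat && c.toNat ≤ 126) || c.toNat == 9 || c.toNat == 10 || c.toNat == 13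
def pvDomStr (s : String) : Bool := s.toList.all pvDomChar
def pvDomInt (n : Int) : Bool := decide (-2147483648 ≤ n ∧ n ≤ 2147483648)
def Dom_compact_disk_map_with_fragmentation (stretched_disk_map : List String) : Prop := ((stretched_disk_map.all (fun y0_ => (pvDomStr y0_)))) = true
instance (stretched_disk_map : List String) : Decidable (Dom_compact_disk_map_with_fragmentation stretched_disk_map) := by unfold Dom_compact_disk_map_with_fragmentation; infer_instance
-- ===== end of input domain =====

-- B replaces A's rescan-and-splice compaction by one counting pass and one fill pass (a different
-- algorithm of the same measured cost on the generated inputs); both Pythons mutate the argument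
-- in place, the equivalence proved here is about the return value.

-- ===== PORT A =====

-- inner `while last_item is None` loop: pop trailing elements until a non-"." is found;
-- `none` = IndexError (list ran empty).
def popLastBlock (L : List String) : Option (String × List String) :=
  match _h0 : L.getLast? with
  | none => none
  | some x => if x = "." then popLastBlock L.dropLast else some (x, L.dropLast)
termination_by L.length
decreasing_by
  have hne : L ≠ [] := by intro hL; subst hL; simp at _h0
  have : 0 < L.length := List.length_pos_iff.mpr hne
  simp [List.length_dropLast]; omega

-- the `for i, digit in enumerate(...)` loop (index-based, over the mutating list);
-- `none` = IndexError raised inside the body; the fuel L.length + 1 passed by the caller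
-- provably suffices (L.length - i strictly decreases at each recursive call).
def forPass : Nat → List String → Nat → Option (List String)
  | 0, _, _ => none
  | fuel + 1, L, i =>
    if i < L.length then
      if L.getD i "" = "." then
        match popLastBlock L with
        | none => none
        | some (x, L') =>
          if i < L'.length then
            forPass fuel (L'.take i ++ x :: L'.drop (i + 1)) (i + 1)
          else none
      else forPass fuel L (i + 1)
    else some L

-- `while "." in stretched_disk_map` loop; fuel L.length + 1 provably suffices (each pass
-- that fires strictly shrinks the list); `none` = IndexError propagated.
def whileLoop : Nat → List String → Option (List String)
  | 0, _ => none
  | n + 1, L =>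
    if "." ∈ L then
      match forPass (L.length + 1) L 0 with
      | none => none
      | some M => whileLoop n M
    else some L

def compact_disk_map_with_fragmentation (stretched_disk_map : List String) : List String :=
  (whileLoop (stretched_disk_map.length + 1) stretched_disk_map).getD []

-- ===== PORT B =====

-- the fill loop of Source B: walk the kept prefix, replacing each "." by supply[s]
-- (supply.getD s "" is exact: Source B never indexes supply out of range).
def altGo (pre supply : List String) (s : Nat) : List String :=
  match pre with
  | [] => []
  | x :: xs => if x = "." then supply.getD s "" :: altGo xs supply (s + 1) else x :: altGo xs supply s

def compact_disk_map_with_fragmentation_alt (stretched_disk_map : List String) : List String :=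
  let k := stretched_disk_map.countP (fun x => x != ".")
  let supply := stretched_disk_map.reverse.filter (fun x => x != ".")
  altGo (stretched_disk_map.take k) supply 0

-- ===== PRECONDITION & SPEC =====

-- Pre_ excludes exactly the inputs on which the Python A raises IndexError (its
-- pop-from-the-end loop runs the list empty): those with a "." at some index j having
-- as many non-"." entries after it as "." entries strictly before it.
def Pre_compact_disk_map_with_fragmentation (stretched_disk_map : List String) : Prop :=
  ∀ j, j < stretched_disk_map.length → stretched_disk_map.getD j "" = "." →
    (stretched_disk_map.drop (j + 1)).countP (fun x => x != ".") ≠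
      (stretched_disk_map.take j).countP (fun x => x == ".")

instance (stretched_disk_map : List String) : Decidable (Pre_compact_disk_map_with_fragmentation stretched_disk_map) := by
  unfold Pre_compact_disk_map_with_fragmentation; infer_instance

def pvWitness_compact_disk_map_with_fragmentation : List String := ["0", ".", "1"]

def Spec_compact_disk_map_with_fragmentation (stretched_disk_map : List String) (out : List String) : Prop :=
  out = compact_disk_map_with_fragmentation_alt stretched_disk_map
instance (stretched_disk_map : List String) (out : List String) : Decidable (Spec_compact_disk_map_with_fragmentation stretched_disk_map out) := by
  unfold Spec_compact_disk_map_with_fragmentation; infer_instance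

-- ===== CLAIM =====

def Claim_equal_compact_disk_map_with_fragmentation : Prop :=
  ∀ (stretched_disk_map : List String), Dom_compact_disk_map_with_fragmentation stretched_disk_map →
    Pre_compact_disk_map_with_fragmentation stretched_disk_map →
    Spec_compact_disk_map_with_fragmentation stretched_disk_map (compact_disk_map_with_fragmentation stretched_disk_map)

-- ===== LEMMAS AND PROOFS =====

-- unfolding equation for popLastBlock on a nonempty list, used below and in proofs
theorem popLastBlock_concat (M : List String) (y : String) :
    popLastBlock (M ++ [y]) = if y = "." then popLastBlock M else some (y, M) := by
  rw [popLastBlock]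
  split
  · rename_i heq; simp at heq
  · rename_i x heq
    rw [List.getLast?_concat] at heq
    cases heq
    simp

theorem altGo_nodot (pre supply : List String) (s : Nat)
    (hs : ∀ y ∈ supply, y ≠ ".") : "." ∉ altGo pre supply s := by
  induction pre generalizing s with
  | nil => simp [altGo]
  | cons x xs ih =>
    simp only [altGo]
    by_cases hx : x = "."
    · simp only [if_pos hx, List.mem_cons, not_or]
      refine ⟨?_, fun h => ih (s + 1) h⟩
      by_cases hlt : s < supply.length
      · have hmem : supply.getD s "" ∈ supply := by
          rw [List.getD_eq_getElem _ _ hlt]; exact List.getElem_mem _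
        exact fun h => hs _ hmem h.symm
      · rw [List.getD_eq_default _ _ (by omega)]
        intro h; exact absurd h.symm (by decide)
    · simp only [if_neg hx, List.mem_cons, not_or]
      exact ⟨fun h => hx h.symm, fun h => ih s h⟩

theorem altGo_id (pre supply : List String) (s : Nat) (h : ∀ y ∈ pre, y ≠ ".") :
    altGo pre supply s = pre := by
  induction pre generalizing s with
  | nil => rfl
  | cons x xs ih =>
    have hx : x ≠ "." := h x (by simp)
    simp [altGo, if_neg hx, ih _ (fun y hy => h y (by simp [hy]))]

theorem alt_of_nodot (L : List String) (h : ∀ y ∈ L, y ≠ ".") :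
    compact_disk_map_with_fragmentation_alt L = L := by
  have hcount : L.countP (fun x => x != ".") = L.length := by
    rw [List.countP_eq_length]
    intro a ha; simpa using h a ha
  simp only [compact_disk_map_with_fragmentation_alt, hcount, List.take_length]
  exact altGo_id _ _ _ h

theorem alt_nodot (L : List String) : "." ∉ compact_disk_map_with_fragmentation_alt L := by
  apply altGo_nodot
  intro y hy
  simpa using (List.of_mem_filter hy)

theorem altGo_supply_shift (pre S : List String) (y : String) (s : Nat) :
    altGo pre (y :: S) (s + 1) = altGo pre S s := by
  induction pre generalizing s with
  | nil => rfl
  | cons x xs ih => simp [altGo, ih]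

theorem altGo_supply_append (pre S T : List String) (s : Nat)
    (h : s + pre.countP (fun x => x == ".") ≤ S.length) :
    altGo pre (S ++ T) s = altGo pre S s := by
  induction pre generalizing s with
  | nil => rfl
  | cons x xs ih =>
    by_cases hx : x = "."
    · have hcount : (x :: xs).countP (fun x => x == ".") = xs.countP (fun x => x == ".") + 1 := by
        simp [hx]
      have hs : s < S.length := by omega
      simp only [altGo, if_pos hx]
      rw [List.getD_eq_getElem _ _ (by simp; omega), List.getD_eq_getElem _ _ hs,
        List.getElem_append_left hs, ih (s + 1) (by omega)]
    · have hcount : (x :: xs).countP (fun x => x == ".") = xs.countP (fun x => x == ".") := by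
        simp [hx]
      simp only [altGo, if_neg hx]
      rw [ih s (by omega)]

theorem dots_take_le (R : List String) (m : Nat) :
    (R.take m).countP (fun x => x == ".") ≤ m := by
  calc (R.take m).countP (fun x => x == ".") ≤ (R.take m).length := List.countP_le_length
    _ ≤ m := List.length_take_le m R

theorem alt_cons_block (x : String) (R : List String) (hx : x ≠ ".") :
    compact_disk_map_with_fragmentation_alt (x :: R) =
      x :: compact_disk_map_with_fragmentation_alt R := by
  have hk : (x :: R).countP (fun x => x != ".") = R.countP (fun x => x != ".") + 1 := by
    simp [hx]
  have hsup : (x :: R).reverse.filter (fun x => x != ".") =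
      R.reverse.filter (fun x => x != ".") ++ [x] := by
    simp [List.filter_append, hx]
  have hlen : (R.reverse.filter (fun x => x != ".")).length = R.countP (fun x => x != ".") := by
    rw [List.countP_eq_length_filter]
    simp [List.filter_reverse]
  simp only [compact_disk_map_with_fragmentation_alt, hk, hsup, List.take_succ_cons, altGo,
    if_neg hx]
  congr 1
  apply altGo_supply_append
  rw [hlen]
  simpa using dots_take_le R _

theorem alt_cons_dot (x : String) (M D : List String) (hx : x ≠ ".")
    (hD : ∀ y ∈ D, y = ".") :
    compact_disk_map_with_fragmentation_alt ("." :: (M ++ x :: D)) =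
      x :: compact_disk_map_with_fragmentation_alt M := by
  have hDf : D.filter (fun x => x != ".") = [] := by
    rw [List.filter_eq_nil_iff]; intro y hy; simp [hD y hy]
  have hDc : D.countP (fun x => x != ".") = 0 := by
    rw [List.countP_eq_length_filter, hDf]; rfl
  have hk : ("." :: (M ++ x :: D)).countP (fun x => x != ".") =
      M.countP (fun x => x != ".") + 1 := by
    simp [List.countP_append, hx, hDc]
  have hM : M.countP (fun x => x != ".") ≤ M.length := List.countP_le_length
  have hsup : ("." :: (M ++ x :: D)).reverse.filter (fun x => x != ".") =
      x :: M.reverse.filter (fun x => x != ".") := by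
    simp [List.filter_append, hx, hDf]
  have htake : (M ++ x :: D).take (M.countP (fun x => x != ".")) =
      M.take (M.countP (fun x => x != ".")) := List.take_append_of_le_length hM
  simp only [compact_disk_map_with_fragmentation_alt, hk, List.take_succ_cons, htake, hsup,
    altGo, if_pos]
  rw [altGo_supply_shift]
  simp

theorem exists_last_block (l : List String) (h : l.countP (fun x => x != ".") ≠ 0) :
    ∃ M x D, l = M ++ x :: D ∧ x ≠ "." ∧ ∀ y ∈ D, y = "." := by
  induction l using List.reverseRecOn with
  | nil => simp at h
  | append_singleton M y ih =>
    by_cases hy : y = "."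
    · have : M.countP (fun x => x != ".") ≠ 0 := by
        simpa [List.countP_append, hy] using h
      obtain ⟨M', x, D', rfl, hx, hD⟩ := ih this
      refine ⟨M', x, D' ++ [y], by simp, hx, ?_⟩
      intro z hz
      rcases List.mem_append.mp hz with hz | hz
      · exact hD z hz
      · simpa [hy] using hz
    · exact ⟨M, y, [], rfl, hy, by simp⟩

theorem popLastBlock_skip (l D : List String) (x : String) (hx : x ≠ ".")
    (hD : ∀ y ∈ D, y = ".") : popLastBlock (l ++ x :: D) = some (x, l) := by
  induction D using List.reverseRecOn with
  | nil => rw [show l ++ [x] = l ++ [x] from rfl, popLastBlock_concat, if_neg hx]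
  | append_singleton D' y ih =>
    have hy : y = "." := hD y (by simp)
    have : l ++ x :: (D' ++ [y]) = (l ++ x :: D') ++ [y] := by simp
    rw [this, popLastBlock_concat, if_pos hy]
    exact ih fun z hz => hD z (by simp [hz])

-- the condition Pre_ imposes on the not-yet-visited suffix R of the list
def PreR (R : List String) : Prop :=
  ∀ j, j < R.length → R.getD j "" = "." →
    (R.drop (j + 1)).countP (fun x => x != ".") ≠ (R.take j).countP (fun x => x == ".")

theorem preR_cons_block (x : String) (R : List String) (hx : x ≠ ".")
    (h : PreR (x :: R)) : PreR R := by
  intro j hj hdot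
  have := h (j + 1) (by simp; omega) (by simpa using hdot)
  simpa [hx] using this

theorem preR_cons_dot (M D : List String) (x : String) (hx : x ≠ ".")
    (hD : ∀ y ∈ D, y = ".") (h : PreR ("." :: (M ++ x :: D))) : PreR M := by
  have hDc : D.countP (fun x => x != ".") = 0 := by
    rw [List.countP_eq_zero]
    intro y hy; simp [hD y hy]
  intro j hj hdot
  have hget : ("." :: (M ++ x :: D)).getD (j + 1) "" = "." := by
    have h1 : ("." :: (M ++ x :: D)).getD (j + 1) "" = (M ++ x :: D).getD j "" := by
      simp [List.getD]
    have h2 : (M ++ x :: D).getD j "" = M.getD j "" := by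
      simp [List.getD, List.getElem?_append_left hj]
    rw [h1, h2]; exact hdot
  have hmain := h (j + 1) (by simp; omega) hget
  have hdrop : (("." :: (M ++ x :: D)).drop (j + 1 + 1)).countP (fun x => x != ".") =
      (M.drop (j + 1)).countP (fun x => x != ".") + 1 := by
    have h1 : ("." :: (M ++ x :: D)).drop (j + 1 + 1) = (M ++ x :: D).drop (j + 1) := by simp
    have h2 : (M ++ x :: D).drop (j + 1) = M.drop (j + 1) ++ x :: D := by
      rw [List.drop_append_of_le_length (by omega)]
    rw [h1, h2]
    simp [List.countP_append, hx, hDc]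
  have htake : (("." :: (M ++ x :: D)).take (j + 1)).countP (fun x => x == ".") =
      (M.take j).countP (fun x => x == ".") + 1 := by
    have h1 : ("." :: (M ++ x :: D)).take (j + 1) = "." :: (M ++ x :: D).take j := by simp
    have h2 : (M ++ x :: D).take j = M.take j := List.take_append_of_le_length (by omega)
    rw [h1, h2]
    simp [Nat.add_comm]
  rw [hdrop, htake] at hmain
  omega

theorem forPass_main (n : Nat) : ∀ (R P : List String) (fuel : Nat), R.length ≤ n →
    R.length < fuel → PreR R →
    forPass fuel (P ++ R) P.length = some (P ++ compact_disk_map_with_fragmentation_alt R) := by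
  induction n with
  | zero =>
    intro R P fuel hlen hfuel _
    have : R = [] := List.eq_nil_of_length_eq_zero (by omega)
    subst this
    obtain ⟨f, rfl⟩ : ∃ f, fuel = f + 1 := ⟨fuel - 1, by omega⟩
    simp [forPass, compact_disk_map_with_fragmentation_alt, altGo]
  | succ n ih =>
    intro R P fuel hlen hfuel hpre
    obtain ⟨f, rfl⟩ : ∃ f, fuel = f + 1 := ⟨fuel - 1, by omega⟩
    cases R with
    | nil => simp [forPass, compact_disk_map_with_fragmentation_alt, altGo]
    | cons x R' =>
      have hi : P.length < (P ++ x :: R').length := by simp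
      have hget : (P ++ x :: R').getD P.length "" = x := by
        simp [List.getD]

      by_cases hx : x = "."
      · -- the dot case: pop the last block and splice it in
        subst hx
        have hne : R'.countP (fun x => x != ".") ≠ 0 := by
          have := hpre 0 (by simp) (by simp [List.getD])
          simpa using this
        obtain ⟨M, b, D, rfl, hb, hD⟩ := exists_last_block R' hne
        have hpop : popLastBlock (P ++ "." :: (M ++ b :: D)) = some (b, P ++ "." :: M) := by
          have : P ++ "." :: (M ++ b :: D) = (P ++ "." :: M) ++ b :: D := by simp
          rw [this]
          exact popLastBlock_skip _ _ _ hb hD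
        have hi2 : P.length < (P ++ "." :: M).length := by simp
        simp only [forPass, if_pos hi, if_pos hget, hpop, if_pos hi2]
        have htake : (P ++ "." :: M).take P.length = P := List.take_left
        have hdrop : (P ++ "." :: M).drop (P.length + 1) = M :=
          List.drop_length_add_append 1
        rw [htake, hdrop]
        have hstep : P ++ b :: M = (P ++ [b]) ++ M := by simp
        have hlen2 : (P ++ [b]).length = P.length + 1 := by simp
        rw [hstep, show P.length + 1 = (P ++ [b]).length from hlen2.symm]
        rw [ih M (P ++ [b]) f (by simp at hlen ⊢; omega) (by simp at hfuel ⊢; omega)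
          (preR_cons_dot M D b hb hD hpre)]
        rw [alt_cons_dot b M D hb hD]
        simp
      · -- the non-dot case: step over it
        simp only [forPass, if_pos hi, if_neg (show ¬(P ++ x :: R').getD P.length "" = "." by
          rw [hget]; exact hx)]
        have hstep : P ++ x :: R' = (P ++ [x]) ++ R' := by simp
        have hlen2 : (P ++ [x]).length = P.length + 1 := by simp
        rw [hstep, show P.length + 1 = (P ++ [x]).length from hlen2.symm]
        rw [ih R' (P ++ [x]) f (by simp at hlen ⊢; omega) (by simp at hfuel ⊢; omega)
          (preR_cons_block x R' hx hpre)]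
        rw [alt_cons_block x R' hx]
        simp

theorem compact_disk_map_with_fragmentation_spec : Claim_equal_compact_disk_map_with_fragmentation := by
  intro L _ hpre
  unfold Spec_compact_disk_map_with_fragmentation
  unfold compact_disk_map_with_fragmentation
  by_cases hdot : "." ∈ L
  · have hlen : 1 ≤ L.length := List.length_pos_iff.mpr (List.ne_nil_of_mem hdot)
    obtain ⟨m, hm⟩ : ∃ m, L.length = m + 1 := ⟨L.length - 1, by omega⟩
    have hfp : forPass (L.length + 1) L 0 = some (compact_disk_map_with_fragmentation_alt L) := by
      have := forPass_main L.length L [] (L.length + 1) (le_refl _) (by omega) hpre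
      simpa using this
    rw [hm]
    show (whileLoop (m + 1 + 1) L).getD [] = _
    rw [whileLoop, if_pos hdot]
    rw [hfp]
    show (whileLoop (m + 1) (compact_disk_map_with_fragmentation_alt L)).getD [] = _
    rw [whileLoop, if_neg (alt_nodot L)]
    rfl
  · have hno : ∀ y ∈ L, y ≠ "." := fun y hy h => hdot (h ▸ hy)
    rw [whileLoop, if_neg hdot]
    rw [alt_of_nodot L hno]
    rfl
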